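-- pv_equiv track=rewrite | github.com/fgiobergia/DriftInspector | src/adult/overall_drift_global.py | get_cm_detections
-- ===== SOURCE A (Python) =====
-- def get_cm_detections(altered_sg_batch, method_warnings):
--     """
--     Returns the confusion matrix for the detections of a method
--     Args:
--         altered_sg_batch: list of altered subgroups per batch
--         method_warnings: dict of batch_idx: list of warnings or detections
--     Returns:
--         tp, fp, fn, tn
--
--     """
--     tp, fp, fn, tn = 0, 0, 0, 0
--
--     for batch_idx in range(1, len(altered_sg_batch)):
--         num_altered = altered_sg_batch[batch_idx]
--         if batch_idx in method_warnings:
--             num_warnings = len(method_warnings[batch_idx])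
--         else:
--             num_warnings = 0
--
--         # Altered and detected
--         if num_altered > 0 and num_warnings > 0:
--             tp += 1
--         elif num_altered == 0 and num_warnings > 0:
--             fp += 1
--         elif num_altered > 0 and num_warnings == 0:
--             fn += 1
--         else:
--             tn += 1
--     return tp, fp, fn, tn
-- ===== SOURCE B (Python) =====
-- def get_cm_detections(altered_sg_batch, method_warnings):
--     """Marginal-counts decomposition: count the scalar aggregates in flat passes
--     over the tail, then derive the four confusion cells algebraically."""
--     def warned(i):
--         w = method_warnings.get(i)
--         return w is not None and len(w) > 0
--
--     tail = altered_sg_batch[1:]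
--     total = len(tail)
--     altered = sum(1 for x in tail if x > 0)
--     both = sum(1 for i, x in enumerate(tail, 1) if x > 0 and warned(i))
--     zero_warned = sum(1 for i, x in enumerate(tail, 1) if x == 0 and warned(i))
--     return both, zero_warned, altered - both, total - altered - zero_warned
-- ===== Notes on version B (the rewrite author's own statement) =====
-- stated objective: alternative
-- what changed: Replaces the indexed loop with a four-way branching accumulator by flat marginal counts (total, altered, altered-and-warned, zero-and-warned) from which the four confusion cells are derived algebraically.
import Mathlib
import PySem

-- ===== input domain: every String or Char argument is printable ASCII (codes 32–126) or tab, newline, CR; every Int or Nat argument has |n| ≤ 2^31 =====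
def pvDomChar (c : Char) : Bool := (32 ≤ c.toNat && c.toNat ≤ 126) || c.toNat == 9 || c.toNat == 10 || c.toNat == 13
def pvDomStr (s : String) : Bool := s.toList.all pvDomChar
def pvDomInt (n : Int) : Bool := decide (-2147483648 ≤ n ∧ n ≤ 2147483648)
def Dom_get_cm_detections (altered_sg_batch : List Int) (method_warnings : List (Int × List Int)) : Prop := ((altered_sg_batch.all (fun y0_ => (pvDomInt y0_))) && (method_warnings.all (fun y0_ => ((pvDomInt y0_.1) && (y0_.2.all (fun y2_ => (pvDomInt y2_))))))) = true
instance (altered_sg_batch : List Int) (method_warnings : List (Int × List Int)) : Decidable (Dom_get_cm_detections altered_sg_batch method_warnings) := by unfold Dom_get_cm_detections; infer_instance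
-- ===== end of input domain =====

-- B replaces A's indexed four-way-branch loop by flat marginal counts from which the cells are derived; alternative decomposition, same cost.

-- ===== PORT A =====
-- 'batch_idx in method_warnings: len(method_warnings[batch_idx]) else 0'
def pvNumWarnings (method_warnings : List (Int × List Int)) (batch_idx : Int) : Int :=
  match (PySem.Dict.mk method_warnings).get? batch_idx with
  | some w => (w.length : Int)
  | none => 0

-- the body of A's loop (the four-way branch on num_altered / num_warnings)
def pvStepA (acc : Int × Int × Int × Int) (num_altered num_warnings : Int) : Int × Int × Int × Int :=
  if num_altered > 0 ∧ num_warnings > 0 then (acc.1 + 1, acc.2.1, acc.2.2.1, acc.2.2.2)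
  else if num_altered = 0 ∧ num_warnings > 0 then (acc.1, acc.2.1 + 1, acc.2.2.1, acc.2.2.2)
  else if num_altered > 0 ∧ num_warnings = 0 then (acc.1, acc.2.1, acc.2.2.1 + 1, acc.2.2.2)
  else (acc.1, acc.2.1, acc.2.2.1, acc.2.2.2 + 1)

def get_cm_detections (altered_sg_batch : List Int) (method_warnings : List (Int × List Int)) : Int × Int × Int × Int :=
  (PySem.List.pyRange 1 (altered_sg_batch.length : Int) 1).foldl
    (fun acc batch_idx =>
      pvStepA acc (PySem.List.pyGetD altered_sg_batch batch_idx 0) (pvNumWarnings method_warnings batch_idx))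
    (0, 0, 0, 0)

-- ===== PORT B =====
-- 'w = method_warnings.get(i); return w is not None and len(w) > 0'
def pvWarned (method_warnings : List (Int × List Int)) (i : Int) : Bool :=
  match (PySem.Dict.mk method_warnings).get? i with
  | some w => !w.isEmpty
  | none => false

def get_cm_detections_alt (altered_sg_batch : List Int) (method_warnings : List (Int × List Int)) : Int × Int × Int × Int :=
  let tail := PySem.List.slice altered_sg_batch (some 1) none
  let total : Int := tail.length
  let altered : Int := tail.countP (fun x => decide (x > 0))
  let both : Int := (PySem.List.enumerate tail 1).countP (fun p => decide (p.2 > 0) && pvWarned method_warnings p.1)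
  let zero_warned : Int := (PySem.List.enumerate tail 1).countP (fun p => decide (p.2 = 0) && pvWarned method_warnings p.1)
  (both, zero_warned, altered - both, total - altered - zero_warned)

-- ===== PRECONDITION & SPEC =====
def Spec_get_cm_detections (altered_sg_batch : List Int) (method_warnings : List (Int × List Int)) (out : Int × Int × Int × Int) : Prop := out = get_cm_detections_alt altered_sg_batch method_warnings
instance (altered_sg_batch : List Int) (method_warnings : List (Int × List Int)) (out : Int × Int × Int × Int) : Decidable (Spec_get_cm_detections altered_sg_batch method_warnings out) := by unfold Spec_get_cm_detections; infer_instance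

-- ===== CLAIM (what is proved, stated in full; the proofs are below) =====
def Claim_equal_get_cm_detections : Prop := ∀ (altered_sg_batch : List Int) (method_warnings : List (Int × List Int)), Dom_get_cm_detections altered_sg_batch method_warnings → Spec_get_cm_detections altered_sg_batch method_warnings (get_cm_detections altered_sg_batch method_warnings)

-- ===== LEMMAS AND PROOFS =====

lemma pv_warned_iff (mw : List (Int × List Int)) (i : Int) :
    pvWarned mw i = true ↔ pvNumWarnings mw i > 0 := by
  unfold pvNumWarnings pvWarned
  cases h : (PySem.Dict.mk mw).get? i with
  | none => simp
  | some w => cases w <;> simp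

lemma pv_numWarnings_nonneg (mw : List (Int × List Int)) (i : Int) : 0 ≤ pvNumWarnings mw i := by
  unfold pvNumWarnings
  cases (PySem.Dict.mk mw).get? i <;> simp

lemma pv_getD_append_left (ys : List Int) (x i : Int) (h0 : 1 ≤ i) (h1 : i < (ys.length : Int)) :
    PySem.List.pyGetD (ys ++ [x]) i 0 = PySem.List.pyGetD ys i 0 := by
  rw [PySem.List.pyGetD_eq_getElem (ys ++ [x]) 0 (by omega) (by simp; omega),
      PySem.List.pyGetD_eq_getElem ys 0 (by omega) h1]
  rw [List.getElem_append_left]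

lemma pv_getD_append_last (ys : List Int) (x : Int) :
    PySem.List.pyGetD (ys ++ [x]) (ys.length : Int) 0 = x := by
  rw [PySem.List.pyGetD_eq_getElem (ys ++ [x]) 0 (by omega) (by simp)]
  simp

lemma pv_A_snoc (mw : List (Int × List Int)) (ys : List Int) (x : Int) (hy : ys ≠ []) :
    get_cm_detections (ys ++ [x]) mw
      = pvStepA (get_cm_detections ys mw) x (pvNumWarnings mw (ys.length : Int)) := by
  have hlen : (1 : Int) ≤ (ys.length : Int) := by
    have := List.length_pos_of_ne_nil hy; omega
  unfold get_cm_detections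
  have hcast : ((ys ++ [x]).length : Int) = (ys.length : Int) + 1 := by simp
  rw [hcast, PySem.List.pyRange_one_succ_right hlen, List.foldl_append,
      List.foldl_cons, List.foldl_nil, pv_getD_append_last]
  have hcongr := PySem.List.foldl_congr_mem (PySem.List.pyRange 1 (ys.length : Int))
      (fun acc batch_idx =>
        pvStepA acc (PySem.List.pyGetD (ys ++ [x]) batch_idx 0) (pvNumWarnings mw batch_idx))
      (fun acc batch_idx =>
        pvStepA acc (PySem.List.pyGetD ys batch_idx 0) (pvNumWarnings mw batch_idx))
      ((0 : Int), (0 : Int), (0 : Int), (0 : Int))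
      (by
        intro acc i hi
        rw [PySem.List.mem_pyRange_one] at hi
        simp only []
        rw [pv_getD_append_left ys x i hi.1 hi.2])
  rw [hcongr]

lemma pv_B_snoc (mw : List (Int × List Int)) (ys : List Int) (x : Int) (hy : ys ≠ []) :
    get_cm_detections_alt (ys ++ [x]) mw
      = pvStepA (get_cm_detections_alt ys mw) x (pvNumWarnings mw (ys.length : Int)) := by
  have hlen : 1 ≤ ys.length := List.length_pos_of_ne_nil hy
  have hone : ((1 : Nat) : Int) = (1 : Int) := by norm_num
  have h2 : PySem.List.slice ys (some 1) none = ys.drop 1 := by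
    rw [← hone, PySem.List.slice_from_natCast]
  have h1 : PySem.List.slice (ys ++ [x]) (some 1) none = ys.drop 1 ++ [x] := by
    rw [← hone, PySem.List.slice_from_natCast, List.drop_append_of_le_length hlen]
  unfold get_cm_detections_alt
  rw [h1, h2]
  dsimp only
  rw [PySem.List.enumerate_append]
  have h3 : (1 : Int) + ((ys.drop 1).length : Int) = (ys.length : Int) := by
    simp; omega
  rw [h3]
  simp only [List.countP_append, List.length_append, PySem.List.enumerate_cons,
    PySem.List.enumerate_nil, List.countP_cons, List.countP_nil, List.length_cons,
    List.length_nil]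
  have hnw := pv_warned_iff mw (ys.length : Int)
  rcases hw : pvWarned mw (ys.length : Int)
  · rw [hw] at hnw
    have hnw0 : pvNumWarnings mw (ys.length : Int) = 0 := by
      have h4 := pv_numWarnings_nonneg mw (ys.length : Int)
      have h5 : ¬ pvNumWarnings mw (ys.length : Int) > 0 := fun h => by simpa using hnw.mpr h
      omega
    by_cases hx : x > 0 <;> by_cases hx0 : x = 0 <;>
      simp [pvStepA, hx, hx0, hnw0, Prod.ext_iff] <;> omega
  · rw [hw] at hnw
    have hnw1 : pvNumWarnings mw (ys.length : Int) > 0 := hnw.mp rfl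
    by_cases hx : x > 0 <;> by_cases hx0 : x = 0 <;>
      simp [pvStepA, hx, hx0, hnw1, hnw1.ne', Prod.ext_iff] <;> omega

lemma pv_main (mw : List (Int × List Int)) (xs : List Int) :
    get_cm_detections xs mw = get_cm_detections_alt xs mw := by
  induction xs using List.reverseRecOn with
  | nil => rfl
  | append_singleton ys x ih =>
    rcases eq_or_ne ys [] with hy | hy
    · subst hy; rfl
    · rw [pv_A_snoc mw ys x hy, pv_B_snoc mw ys x hy, ih]

-- ===== VERDICT (by name: the statement is the Claim_ definition above) =====
theorem get_cm_detections_spec : Claim_equal_get_cm_detections := by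
  intro xs mw _
  unfold Spec_get_cm_detections
  exact pv_main mw xs
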